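-- pv_equiv track=rewrite | github.com/durgaprasad104/spam-websites-messages | Catcher.py | is_authorized_brand_number
-- ===== SOURCE A (Python) =====
-- def is_authorized_brand_number(number):
--     # Define authorized brands and their phone numbers
--     authorized_brand_numbers = {
--         "Brand A": ["8001234567", "8009876543"],
--         "Brand B": ["8001112222", "8003334444"],
--         "Brand C": ["8005556666", "8007778888"],
--         # Add more authorized brands and their numbers as needed
--     }
--
--     # Check if the number matches any authorized brand
--     for brand, numbers in authorized_brand_numbers.items():
--         if number in numbers:
--             return brand
--     return None
-- ===== SOURCE B (Python) =====
-- # B: one flat number->brand dictionary; a single .get lookup replaces the per-brand loop and list scan.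
-- _NUMBER_TO_BRAND = {
--     "8001234567": "Brand A",
--     "8009876543": "Brand A",
--     "8001112222": "Brand B",
--     "8003334444": "Brand B",
--     "8005556666": "Brand C",
--     "8007778888": "Brand C",
-- }
--
-- def is_authorized_brand_number(number):
--     return _NUMBER_TO_BRAND.get(number)
-- ===== Notes on version B (the rewrite author's own statement) =====
-- stated objective: idiomatic
-- what changed: Replaced the per-brand loop with list-membership scans by one flat number-to-brand dictionary consulted with a single .get lookup.
import Mathlib
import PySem

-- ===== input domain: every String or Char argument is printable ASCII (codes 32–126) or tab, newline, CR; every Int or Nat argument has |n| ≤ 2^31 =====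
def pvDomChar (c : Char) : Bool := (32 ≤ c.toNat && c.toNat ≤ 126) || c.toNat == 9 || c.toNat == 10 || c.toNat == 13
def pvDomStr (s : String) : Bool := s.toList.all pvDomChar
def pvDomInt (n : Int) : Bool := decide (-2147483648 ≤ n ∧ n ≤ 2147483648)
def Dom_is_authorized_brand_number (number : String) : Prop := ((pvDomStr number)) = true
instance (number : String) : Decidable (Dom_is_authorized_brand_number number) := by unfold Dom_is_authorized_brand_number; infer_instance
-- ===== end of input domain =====

-- B replaces A's per-brand loop + list-membership scan by one flat number→brand dict looked up once (idiomatic).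

-- ===== PORT A =====
-- A's dict of brand → numbers (insertion order), iterated, returning the first brand whose list contains number.
def pvBrandTable : List (String × List String) :=
  [("Brand A", ["8001234567", "8009876543"]),
   ("Brand B", ["8001112222", "8003334444"]),
   ("Brand C", ["8005556666", "8007778888"])]

def pvScanBrands (number : String) : List (String × List String) → Option String
  | [] => none
  | (brand, numbers) :: rest =>
      if numbers.contains number then some brand else pvScanBrands number rest

def is_authorized_brand_number (number : String) : Option String :=
  pvScanBrands number pvBrandTable

-- ===== PORT B =====
-- B's flat number → brand dictionary; the function is a single .get lookup.
def pvNumberToBrand : PySem.Dict String String :=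
  PySem.Dict.ofList
    [("8001234567", "Brand A"), ("8009876543", "Brand A"),
     ("8001112222", "Brand B"), ("8003334444", "Brand B"),
     ("8005556666", "Brand C"), ("8007778888", "Brand C")]

def is_authorized_brand_number_alt (number : String) : Option String :=
  pvNumberToBrand.get? number

-- ===== PRECONDITION & SPEC =====
def Spec_is_authorized_brand_number (number : String) (out : Option String) : Prop := out = is_authorized_brand_number_alt number
instance (number : String) (out : Option String) : Decidable (Spec_is_authorized_brand_number number out) := by unfold Spec_is_authorized_brand_number; infer_instance

-- ===== CLAIM (what is proved, stated in full; the proofs are below) =====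
def Claim_equal_is_authorized_brand_number : Prop := ∀ (number : String), Dom_is_authorized_brand_number number → Spec_is_authorized_brand_number number (is_authorized_brand_number number)

-- ===== LEMMAS AND PROOFS =====

-- ===== VERDICT (by name: the statement is the Claim_ definition above) =====
theorem pvNumberToBrand_mk : pvNumberToBrand = PySem.Dict.mk
    [("8001234567", "Brand A"), ("8009876543", "Brand A"),
     ("8001112222", "Brand B"), ("8003334444", "Brand B"),
     ("8005556666", "Brand C"), ("8007778888", "Brand C")] := by decide


theorem is_authorized_brand_number_spec : Claim_equal_is_authorized_brand_number := by
  intro number _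
  unfold Spec_is_authorized_brand_number is_authorized_brand_number is_authorized_brand_number_alt
    pvScanBrands pvBrandTable
  rw [pvNumberToBrand_mk]
  simp only [PySem.Dict.get?_mk_cons, List.contains_cons, List.contains_nil, Bool.or_false]
  rcases eq_or_ne number "8001234567" with h | h1
  · subst h; decide
  rcases eq_or_ne number "8009876543" with h | h2
  · subst h; decide
  rcases eq_or_ne number "8001112222" with h | h3
  · subst h; decide
  rcases eq_or_ne number "8003334444" with h | h4
  · subst h; decide
  rcases eq_or_ne number "8005556666" with h | h5
  · subst h; decide
  rcases eq_or_ne number "8007778888" with h | h6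
  · subst h; decide
  simp [pvScanBrands, beq_iff_eq, h1, h2, h3, h4, h5, h6, Ne.symm h1, Ne.symm h2, Ne.symm h3, Ne.symm h4, Ne.symm h5, Ne.symm h6, PySem.Dict.get?]
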